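-- pv_equiv track=rewrite | github.com/BbqGamer/advent_of_code | 2023/19/aplenty.py | match_part
-- ===== SOURCE A (Python) =====
-- def match_part(part, rules):
--     cur = rules['in']
--     i = 0
--     while True:
--         if cur[i] == 'R':
--             return False
--         elif cur[i] == 'A':
--             return True
--         elif '<' in cur[i]:
--             var, val = cur[i].split('<')
--             if part[var] < int(val):
--                 i += 1
--             else:
--                 i += 2
--         elif '>' in cur[i]:
--             var, val = cur[i].split('>')
--             if part[var] > int(val):
--                 i += 1
--             else:
--                 i += 2
--         else:
--             cur = rules[cur[i]]
--             i = 0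
-- ===== SOURCE B (Python) =====
-- def match_part(part, rules):
--     def classify(tok):
--         if tok == 'A' or tok == 'R':
--             return ('end', tok == 'A')
--         if '<' in tok:
--             return ('cond', '<', tok.split('<'))
--         if '>' in tok:
--             return ('cond', '>', tok.split('>'))
--         return ('jump', tok)
--
--     prog = {name: [classify(tok) for tok in body] for name, body in rules.items()}
--     pc = prog['in']
--     while True:
--         ins = pc[0]
--         if ins[0] == 'end':
--             return ins[1]
--         elif ins[0] == 'jump':
--             pc = prog[ins[1]]
--         else:
--             _, op, parts = ins
--             var, val = parts
--             hit = part[var] < int(val) if op == '<' else part[var] > int(val)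
--             pc = pc[1:] if hit else pc[2:]
-- ===== Notes on version B (the rewrite author's own statement) =====
-- stated objective: alternative
-- what changed: B compiles the whole rules table once into tagged instructions (terminal / jump / condition with its operator and pre-split parts) and runs a small dispatch loop over instruction-list slices, replacing A's per-visit raw-string re-testing and i+=1/i+=2 index arithmetic; it trades the one-pass lazy token inspection of A for an upfront total classification pass plus a simpler interpreter, and returns A's exact value on every input (the proof assumes nothing beyond the input domain; Pre_ only delimits where Python A terminates without an exception, for the differential tester).
import Mathlib
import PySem

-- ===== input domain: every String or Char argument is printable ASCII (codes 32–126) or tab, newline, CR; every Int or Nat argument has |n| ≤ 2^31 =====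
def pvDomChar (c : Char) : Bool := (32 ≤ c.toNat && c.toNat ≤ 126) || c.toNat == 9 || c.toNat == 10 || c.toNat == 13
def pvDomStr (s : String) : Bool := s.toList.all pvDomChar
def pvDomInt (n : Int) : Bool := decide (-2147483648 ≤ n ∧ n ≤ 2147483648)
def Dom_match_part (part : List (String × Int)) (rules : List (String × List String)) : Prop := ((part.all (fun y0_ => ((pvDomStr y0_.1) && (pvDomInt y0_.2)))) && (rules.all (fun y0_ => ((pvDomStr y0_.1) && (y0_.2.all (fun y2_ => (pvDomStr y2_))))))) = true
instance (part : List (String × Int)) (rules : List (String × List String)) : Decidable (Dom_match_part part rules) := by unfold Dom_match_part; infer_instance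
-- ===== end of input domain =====

-- B compiles the whole table once into tagged instructions (terminal / jump / condition with
-- its operator and pre-split parts) and runs a small dispatch loop over suffix slices,
-- replacing A's per-visit string re-testing and i+=1/i+=2 index arithmetic (objective: alternative).

-- ===== PORT A =====
-- A's single while-True loop over (cur, i): the index walk i+=1/i+=2 is the structural
-- recursion on the suffix cur[i:]; only the workflow jump (cur = rules[tok]; i = 0)
-- consumes fuel — a totality guard, never exhausted on Pre_ inputs (no run revisits a
-- workflow there, so at most rules.length jumps happen).
def aWalk (d : PySem.Dict String Int) (r : PySem.Dict String (List String)) :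
    Nat → List String → Bool
  | _, [] => false                    -- Python IndexError; outside Pre_
  | fuel, t :: rest =>
    if t == "R" then false
    else if t == "A" then true
    else if PySem.Str.isIn "<" t then
      match PySem.Str.split? t "<" with
      | some [v, n] =>
        match d.get? v, PySem.Int.ofStr? n with
        | some pv, some c =>
          if pv < c then aWalk d r fuel rest else aWalk d r fuel (rest.drop 1)
        | _, _ => false               -- Python KeyError / ValueError; outside Pre_
      | _ => false                    -- Python unpack ValueError; outside Pre_
    else if PySem.Str.isIn ">" t then
      match PySem.Str.split? t ">" with
      | some [v, n] =>
        match d.get? v, PySem.Int.ofStr? n with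
        | some pv, some c =>
          if pv > c then aWalk d r fuel rest else aWalk d r fuel (rest.drop 1)
        | _, _ => false
      | _ => false
    else
      match fuel with
      | 0 => false
      | f + 1 =>
        match r.get? t with
        | some nxt => aWalk d r f nxt
        | none => false               -- Python KeyError; outside Pre_
  termination_by fuel cur => (fuel, cur.length)
  decreasing_by
    all_goals simp_wf
    all_goals first
      | exact Prod.Lex.left _ _ (by omega)
      | exact Prod.Lex.right _ (by omega)

def match_part (part : List (String × Int)) (rules : List (String × List String)) : Bool :=
  let d := PySem.Dict.ofList part
  let r := PySem.Dict.ofList rules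
  match r.get? "in" with
  | some cur => aWalk d r rules.length cur
  | none => false                     -- Python KeyError 'in'; outside Pre_

-- ===== PORT B =====
-- Source B's instruction type: ('end', accept) / ('jump', name) / ('cond', op, parts)
inductive Instr where
  | endI : Bool → Instr
  | jumpI : String → Instr
  | condI : String → List String → Instr
deriving DecidableEq, Repr

-- Source B's classify: total tagging of one token (tok.split(op) never raises in Python;
-- split? with a non-empty separator is always some, so getD [] is exact)
def classify (tok : String) : Instr :=
  if tok == "A" || tok == "R" then .endI (tok == "A")
  else if PySem.Str.isIn "<" tok then .condI "<" ((PySem.Str.split? tok "<").getD [])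
  else if PySem.Str.isIn ">" tok then .condI ">" ((PySem.Str.split? tok ">").getD [])
  else .jumpI tok

-- Source B's while-True dispatch loop over the compiled suffix pc; fuel is the same totality
-- guard as in port A (one unit per jump)
def bExec (d : PySem.Dict String Int) (cp : PySem.Dict String (List Instr)) :
    Nat → List Instr → Bool
  | _, [] => false                    -- Python IndexError pc[0]; outside Pre_
  | fuel, ins :: rest =>
    match ins with
    | .endI b => b
    | .jumpI t =>
      match fuel with
      | 0 => false
      | f + 1 =>
        match cp.get? t with
        | some body => bExec d cp f body
        | none => false               -- Python KeyError; outside Pre_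
    | .condI op parts =>
      match parts with
      | [v, n] =>
        match d.get? v, PySem.Int.ofStr? n with
        | some pv, some x =>
          if (if op == "<" then decide (pv < x) else decide (pv > x))
          then bExec d cp fuel rest                   -- pc = pc[1:]
          else bExec d cp fuel (rest.drop 1)          -- pc = pc[2:]
        | _, _ => false               -- Python KeyError / ValueError; outside Pre_
      | _ => false                    -- Python unpack ValueError 'var, val = parts'; outside Pre_
  termination_by fuel pc => (fuel, pc.length)
  decreasing_by
    all_goals simp_wf
    all_goals first
      | exact Prod.Lex.left _ _ (by omega)
      | exact Prod.Lex.right _ (by omega)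

def match_part_alt (part : List (String × Int)) (rules : List (String × List String)) : Bool :=
  let d := PySem.Dict.ofList part
  let r := PySem.Dict.ofList rules
  -- prog = {name: [classify(tok) for tok in body] for name, body in rules.items()}
  let cp := PySem.Dict.ofList (r.items.map (fun p => (p.1, p.2.map classify)))
  match cp.get? "in" with
  | some pc => bExec d cp rules.length pc
  | none => false                     -- Python KeyError 'in'; outside Pre_

-- ===== PRECONDITION & SPEC =====
-- A's domain — the runs that reach a terminal token without an exception and without
-- revisiting a workflow (a revisit replays the same deterministic trajectory forever) —
-- is inherently semantic, so Pre_ is this walk of the table with a visited list.  It is a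
-- description of the domain only: the equivalence proof below never uses it (the two ports
-- are proved equal on EVERY input), and it excludes no input on which A returns.
-- one body scan: none = the walk raises here; some none = clean accept/reject reached;
-- some (some t) = the body asks to jump to workflow t
def cleanBody (part : List (String × Int)) : List String → Option (Option String)
  | [] => none                                  -- IndexError
  | t :: rest =>
    if t == "R" || t == "A" then some none      -- clean terminal
    else if PySem.Str.isIn "<" t || PySem.Str.isIn ">" t then
      match PySem.Str.split? t (if PySem.Str.isIn "<" t then "<" else ">") with
      | some [v, n] =>
        match (PySem.Dict.ofList part).get? v, PySem.Int.ofStr? n with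
        | some pv, some x =>
          if (if PySem.Str.isIn "<" t then pv < x else pv > x)
          then cleanBody part rest
          else match rest with
               | _ :: rest2 => cleanBody part rest2
               | [] => none                     -- IndexError two slots ahead
        | _, _ => none                          -- KeyError / ValueError
      | _ => none                               -- unpack ValueError
    else some (some t)                          -- jump request

def cleanWalk (part : List (String × Int)) (rules : List (String × List String)) :
    Nat → List String → List String → Bool
  | fuel, visited, body =>
    match cleanBody part body with
    | none => false
    | some none => true
    | some (some t) =>
      !(visited.contains t) &&                  -- a revisit would loop forever
      (match fuel with
       | 0 => false                             -- unreachable: visited names are distinct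
       | f + 1 =>
         match (PySem.Dict.ofList rules).get? t with
         | some b => cleanWalk part rules f (t :: visited) b
         | none => false)                       -- KeyError

def Pre_match_part (part : List (String × Int)) (rules : List (String × List String)) : Prop :=
  (match (PySem.Dict.ofList rules).get? "in" with
   | some b => cleanWalk part rules rules.length ["in"] b
   | none => false) = true

instance (part : List (String × Int)) (rules : List (String × List String)) :
    Decidable (Pre_match_part part rules) := by unfold Pre_match_part; infer_instance

def pvWitness_match_part : (List (String × Int)) × (List (String × List String)) :=
  ([("x", 5)], [("in", ["x<10", "px", "R"]), ("px", ["x>0", "A", "R"])])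

def Spec_match_part (part : List (String × Int)) (rules : List (String × List String)) (out : Bool) : Prop := out = match_part_alt part rules
instance (part : List (String × Int)) (rules : List (String × List String)) (out : Bool) : Decidable (Spec_match_part part rules out) := by unfold Spec_match_part; infer_instance

-- ===== CLAIM (what is proved, stated in full; the proofs are below) =====
def Claim_equal_match_part : Prop := ∀ (part : List (String × Int)) (rules : List (String × List String)), Dom_match_part part rules → Pre_match_part part rules → Spec_match_part part rules (match_part part rules)

-- ===== LEMMAS AND PROOFS =====

-- looking up in a dict built from a value-mapped pair list is the mapped lookup
theorem get?_foldl_map {α β : Type} (f : α → β) (l : List (String × α)) :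
    ∀ (d : PySem.Dict String α) (d' : PySem.Dict String β),
      (∀ k, d'.get? k = (d.get? k).map f) →
      ∀ k, ((l.map (fun p => (p.1, f p.2))).foldl (fun acc q => acc.insert q.1 q.2) d').get? k
        = ((l.foldl (fun acc q => acc.insert q.1 q.2) d).get? k).map f := by
  induction l with
  | nil => intro d d' h k; exact h k
  | cons a l ih =>
    intro d d' h k
    simp only [List.map_cons, List.foldl_cons]
    refine ih (d.insert a.1 a.2) (d'.insert a.1 (f a.2)) (fun j => ?_) k
    rw [PySem.Dict.get?_insert, PySem.Dict.get?_insert]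
    by_cases hj : j = a.1 <;> simp [hj, h j]

theorem get?_ofList_map {α β : Type} (f : α → β) (l : List (String × α)) (k : String) :
    (PySem.Dict.ofList (l.map (fun p => (p.1, f p.2)))).get? k
      = ((PySem.Dict.ofList l).get? k).map f :=
  get?_foldl_map f l PySem.Dict.empty PySem.Dict.empty (fun _ => rfl) k

theorem ofList_items_self {α : Type} (l : List (String × α))
    (hnd : (l.map Prod.fst).Nodup) : (PySem.Dict.ofList l).items = l := by
  have h := PySem.Dict.items_foldl_insert_fresh (l := l) (k := Prod.fst) (v := Prod.snd)
    (d := PySem.Dict.empty) (by intro a _; exact PySem.Dict.contains_empty _) hnd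
  simpa [PySem.Dict.ofList, PySem.Dict.update, PySem.Dict.empty] using h

theorem ofList_items_eq {α : Type} (d : PySem.Dict String α)
    (hnd : (d.items.map Prod.fst).Nodup) : PySem.Dict.ofList d.items = d :=
  PySem.Dict.ext (ofList_items_self d.items hnd)

-- the compiled program looks up as the classified body of the rules dict
theorem get?_compiled (rules : List (String × List String)) (t : String) :
    (PySem.Dict.ofList ((PySem.Dict.ofList rules).items.map
        (fun p => (p.1, p.2.map classify)))).get? t
      = ((PySem.Dict.ofList rules).get? t).map (List.map classify) := by
  rw [get?_ofList_map (List.map classify) (PySem.Dict.ofList rules).items t,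
    ofList_items_eq (PySem.Dict.ofList rules)
      (by simpa [PySem.Dict.keys] using PySem.Dict.nodup_keys_ofList rules)]

-- the bisimulation: A's raw-token ladder at any suffix equals B's dispatch loop on the
-- classified suffix, with the same fuel — on EVERY input
theorem walk_exec_eq (d : PySem.Dict String Int) (r : PySem.Dict String (List String))
    (cp : PySem.Dict String (List Instr))
    (hcp : ∀ t, cp.get? t = (r.get? t).map (List.map classify))
    (fuel : Nat) (suffix : List String) :
    aWalk d r fuel suffix = bExec d cp fuel (suffix.map classify) := by
  match suffix with
  | [] => simp [aWalk, bExec]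
  | t :: rest =>
    simp only [List.map_cons]
    cases hR : t == "R" with
    | true =>
      have ht : t = "R" := by simpa using hR
      subst ht
      have hcl : classify "R" = .endI false := by simp [classify]
      rw [hcl, aWalk.eq_def, bExec.eq_def]
      simp
    | false =>
      cases hA : t == "A" with
      | true =>
        have ht : t = "A" := by simpa using hA
        subst ht
        have hcl : classify "A" = .endI true := by simp [classify]
        rw [hcl, aWalk.eq_def, bExec.eq_def]
        simp
      | false =>
        rw [aWalk.eq_def]
        simp only [hR, hA, Bool.false_eq_true, if_false]
        cases hlt : PySem.Str.isIn "<" t with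
        | true =>
          have hcl : classify t = .condI "<" ((PySem.Str.split? t "<").getD []) := by
            simp only [classify, hR, hA, Bool.or_false, Bool.false_eq_true, if_false,
              hlt, if_true]
          rw [hcl]
          simp only [if_true]
          cases hsp : PySem.Str.split? t "<" with
          | none => simp [bExec]
          | some ps =>
            simp only [Option.getD_some]
            rcases ps with _ | ⟨v, _ | ⟨n, _ | ⟨m, ps'⟩⟩⟩
            · simp [bExec]
            · simp [bExec]
            · cases hv : d.get? v with
              | none => simp [bExec, hv]
              | some pv =>
                cases hn : PySem.Int.ofStr? n with
                | none => simp [bExec, hv, hn]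
                | some x =>
                  have h1 := walk_exec_eq d r cp hcp fuel rest
                  have h2 := walk_exec_eq d r cp hcp fuel (rest.drop 1)
                  by_cases hcmp : pv < x
                  · simp [bExec, hv, hn, hcmp, h1]
                  · simp only [List.drop_one] at h2
                    simp [bExec, hv, hn, hcmp, h2]
            · simp [bExec]
        | false =>
          simp only [Bool.false_eq_true, if_false]
          cases hgt : PySem.Str.isIn ">" t with
          | true =>
            have hcl : classify t = .condI ">" ((PySem.Str.split? t ">").getD []) := by
              simp only [classify, hR, hA, Bool.or_false, Bool.false_eq_true, if_false,
                hlt, hgt, if_true]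
            rw [hcl]
            simp only [if_true]
            cases hsp : PySem.Str.split? t ">" with
            | none => simp [bExec]
            | some ps =>
              simp only [Option.getD_some]
              rcases ps with _ | ⟨v, _ | ⟨n, _ | ⟨m, ps'⟩⟩⟩
              · simp [bExec]
              · simp [bExec]
              · cases hv : d.get? v with
                | none => simp [bExec, hv]
                | some pv =>
                  cases hn : PySem.Int.ofStr? n with
                  | none => simp [bExec, hv, hn]
                  | some x =>
                    have h1 := walk_exec_eq d r cp hcp fuel rest
                    have h2 := walk_exec_eq d r cp hcp fuel (rest.drop 1)
                    by_cases hcmp : pv > x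
                    · simp [bExec, hv, hn, hcmp, h1]
                    · simp only [List.drop_one] at h2
                      simp [bExec, hv, hn, hcmp, h2]
              · simp [bExec]
          | false =>
            have hcl : classify t = .jumpI t := by
              simp only [classify, hR, hA, Bool.or_false, Bool.false_eq_true, if_false,
                hlt, hgt]
            rw [hcl]
            cases fuel with
            | zero => simp [bExec]
            | succ f =>
              rw [bExec.eq_def]
              simp only [hcp t]
              cases hr : r.get? t with
              | none => rfl
              | some nxt =>
                simpa using walk_exec_eq d r cp hcp f nxt
  termination_by (fuel, suffix.length)
  decreasing_by
    all_goals simp_wf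
    all_goals first
      | exact Prod.Lex.left _ _ (by omega)
      | exact Prod.Lex.right _ (by omega)

-- ===== VERDICT (by name: the statement is the Claim_ definition above) =====
theorem match_part_spec : Claim_equal_match_part := by
  intro part rules _hdom _hpre
  unfold Spec_match_part match_part match_part_alt
  simp only []
  rw [get?_compiled rules "in"]
  cases h : (PySem.Dict.ofList rules).get? "in" with
  | none => rfl
  | some cur =>
    simpa using walk_exec_eq (PySem.Dict.ofList part) (PySem.Dict.ofList rules)
      (PySem.Dict.ofList ((PySem.Dict.ofList rules).items.map (fun p => (p.1, p.2.map classify))))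
      (get?_compiled rules) rules.length cur
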